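-- pv_equiv track=rewrite | github.com/camiloricoe/python-camilo | CodeSignal/Arcade/The Core/48-Weak Numbers.py | solution
-- ===== SOURCE A (Python) =====
-- def solution(n):
--     div = []
--     wk = []
--
--     for i in range(1, n+1):
--         divisors = d(i)
--         div.append(divisors)
--         wk.append(sum([1 for i in div if i > divisors]))
--
--     mwk = max(wk)
--
--     return [mwk, wk.count(mwk)]
--
-- def d(n):
--     return len([i for i in range(1, n+1) if n % i == 0])
-- ===== SOURCE B (Python) =====
-- def solution(n):
--     # Sieve the divisor counts in O(n log n), then count "earlier strictly larger"
--     # with a frequency table over divisor-count values, tracking max/count in one pass.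
--     dc = [0] * (n + 1)
--     for j in range(1, n + 1):
--         for m in range(j, n + 1, j):
--             dc[m] += 1
--
--     maxdc = 0
--     for v in dc:
--         maxdc = max(maxdc, v)
--
--     freq = [0] * (maxdc + 2)
--     best = -1
--     cbest = 0
--     for v in dc[1:]:
--         w = sum(freq[v + 1:])
--         freq[v] += 1
--         if w > best:
--             best, cbest = w, 1
--         elif w == best:
--             cbest += 1
--     return [best, cbest]
-- ===== Notes on version B (the rewrite author's own statement) =====
-- stated objective: faster
-- what changed: B replaces A's per-number trial-division divisor count and per-number rescan of all earlier counts (both quadratic) by a single divisor-count sieve over multiples plus a frequency table over divisor-count values from which each weakness is read off, tracking the running max and its multiplicity in the same pass.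
-- outside the precondition, e.g. on solution(0): A raises ValueError, B returns [-1, 0]
import Mathlib
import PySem

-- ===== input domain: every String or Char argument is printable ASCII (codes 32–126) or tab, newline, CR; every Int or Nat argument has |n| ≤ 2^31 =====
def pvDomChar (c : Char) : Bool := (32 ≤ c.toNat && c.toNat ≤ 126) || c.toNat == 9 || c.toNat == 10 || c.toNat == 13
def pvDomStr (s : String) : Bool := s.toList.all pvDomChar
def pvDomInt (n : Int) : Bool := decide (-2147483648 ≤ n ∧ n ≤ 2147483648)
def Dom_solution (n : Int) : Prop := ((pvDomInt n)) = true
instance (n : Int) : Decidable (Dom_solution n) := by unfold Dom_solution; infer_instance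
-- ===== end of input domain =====

-- B sieves divisor counts over multiples and reads each weakness off a frequency table of
-- earlier divisor counts, tracking the running max and its multiplicity in one pass (faster).

-- ===== PORT A =====
-- helper d(n): number of divisors by trial division
def pvD (n : Int) : Int :=
  PySem.List.len ((PySem.List.pyRange 1 (n+1) 1).filter (fun i => PySem.Int.mod n i == 0))

def solution (n : Int) : List Int :=
  let st := (PySem.List.pyRange 1 (n+1) 1).foldl
    (fun (st : List Int × List Int) i =>
      let divisors := pvD i
      let div := st.1 ++ [divisors]
      let wk := st.2 ++ [((div.filter (fun x => decide (divisors < x))).map (fun _ => (1:Int))).sum]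
      (div, wk)) ([], [])
  match PySem.List.max? st.2 (fun x => x) with
  | some mwk => [mwk, PySem.List.count st.2 mwk]
  | none => []  -- unreachable under Pre_solution (Python's max([]) raises ValueError)

-- ===== PORT B =====
-- 'a[m] += 1'; every index B uses is in range, so pySetD/pyGetD are exact here
def pvInc (a : List Int) (m : Int) : List Int :=
  PySem.List.pySetD a m (PySem.List.pyGetD a m 0 + 1)

def solution_alt (n : Int) : List Int :=
  let dc0 : List Int := List.replicate (n+1).toNat 0          -- [0]*(n+1)
  let dc := (PySem.List.pyRange 1 (n+1) 1).foldl
    (fun a j => (PySem.List.pyRange j (n+1) j).foldl pvInc a) dc0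
  let maxdc := dc.foldl (fun acc v => max acc v) 0
  let st := (PySem.List.slice dc (some 1) none).foldl
    (fun (st : List Int × Int × Int) v =>
      let w := (PySem.List.slice st.1 (some (v+1)) none).sum  -- sum(freq[v+1:])
      let freq := pvInc st.1 v                                 -- freq[v] += 1
      if st.2.1 < w then (freq, w, 1)
      else if w == st.2.1 then (freq, st.2.1, st.2.2 + 1)
      else (freq, st.2.1, st.2.2))
    (List.replicate (maxdc+2).toNat 0, -1, 0)
  [st.2.1, st.2.2]

-- ===== PRECONDITION & SPEC =====
-- Pre_ excludes exactly n <= 0, where A's max([]) raises ValueError.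
def Pre_solution (n : Int) : Prop := 1 ≤ n
instance (n : Int) : Decidable (Pre_solution n) := by unfold Pre_solution; infer_instance
def pvWitness_solution : Int := (5)

def Spec_solution (n : Int) (out : List Int) : Prop := out = solution_alt n
instance (n : Int) (out : List Int) : Decidable (Spec_solution n out) := by unfold Spec_solution; infer_instance

-- ===== CLAIM (what is proved, stated in full; the proofs are below) =====
def Claim_equal_solution : Prop := ∀ (n : Int), Dom_solution n → Pre_solution n → Spec_solution n (solution n)

-- ===== LEMMAS AND PROOFS =====

-- the weakness list determined by a list of divisor counts, threading the prefix already seen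
def wkSpec : List Int → List Int → List Int
  | _, [] => []
  | prev, v :: rest => ((prev.countP (fun x => decide (v < x)) : Int)) :: wkSpec (prev ++ [v]) rest

-- the frequency table of a prefix: entry k holds the number of occurrences of k
def countsList (L : Nat) (p : List Int) : List Int :=
  (List.range L).map (fun (k : Nat) => (p.count (k:Int) : Int))

-- the running (max, multiplicity) step of B's loop
def mcStep (p : Int × Int) (w : Int) : Int × Int :=
  if p.1 < w then (w, 1) else if w == p.1 then (p.1, p.2 + 1) else p

-- B's loop body as a named function (definitionally the lambda in solution_alt)
def pvStepB (st : List Int × Int × Int) (v : Int) : List Int × Int × Int :=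
  let w := (PySem.List.slice st.1 (some (v+1)) none).sum
  let freq := pvInc st.1 v
  if st.2.1 < w then (freq, w, 1)
  else if w == st.2.1 then (freq, st.2.1, st.2.2 + 1)
  else (freq, st.2.1, st.2.2)

lemma A_fold (l : List Int) (div wk : List Int) :
    l.foldl (fun (st : List Int × List Int) i =>
      let divisors := pvD i
      let div := st.1 ++ [divisors]
      let wk := st.2 ++ [((div.filter (fun x => decide (divisors < x))).map (fun _ => (1:Int))).sum]
      (div, wk)) (div, wk)
    = (div ++ l.map pvD, wk ++ wkSpec div (l.map pvD)) := by
  induction l generalizing div wk with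
  | nil => simp [wkSpec]
  | cons i t ih =>
    simp only [List.foldl_cons, List.map_cons, wkSpec]
    rw [ih]
    have hfilter : (div ++ [pvD i]).filter (fun x => decide (pvD i < x))
        = div.filter (fun x => decide (pvD i < x)) := by
      rw [List.filter_append]; simp
    rw [hfilter, PySem.List.sum_map_const_int, mul_one, ← List.countP_eq_length_filter]
    simp [List.append_assoc]

lemma fold_inc_length (ps : List Int) (a : List Int) :
    (ps.foldl pvInc a).length = a.length := by
  induction ps generalizing a with
  | nil => rfl
  | cons m t ih => rw [List.foldl_cons, ih, pvInc, PySem.List.length_pySetD]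

lemma fold_inc_get (ps : List Int) (a : List Int)
    (h : ∀ m ∈ ps, 0 ≤ m ∧ m < (a.length : Int)) (k : Nat) (hk : k < a.length) :
    PySem.List.pyGetD (ps.foldl pvInc a) (k : Int) 0
      = PySem.List.pyGetD a (k : Int) 0 + (ps.count (k : Int) : Int) := by
  induction ps generalizing a with
  | nil => simp
  | cons m t ih =>
    obtain ⟨hm0, hmlen⟩ := h m List.mem_cons_self
    obtain ⟨mN, rfl⟩ : ∃ mN : Nat, m = (mN : Int) := ⟨m.toNat, by omega⟩
    have hmlt : mN < a.length := by omega
    have hlen' : (pvInc a (mN : Int)).length = a.length := by rw [pvInc, PySem.List.length_pySetD]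
    have hk' : k < (pvInc a (mN : Int)).length := by omega
    rw [List.foldl_cons,
        ih (pvInc a (mN : Int))
          (by intro x hx; rw [hlen']; exact h x (List.mem_cons_of_mem _ hx)) hk']
    have hget : PySem.List.pyGetD (pvInc a (mN : Int)) (k : Int) 0
        = if k = mN then PySem.List.pyGetD a ((mN : Nat) : Int) 0 + 1
          else PySem.List.pyGetD a (k : Int) 0 := by
      rw [pvInc, PySem.List.pyGetD_pySetD_natCast a mN k _ 0 hmlt]
    rw [hget, List.count_cons]
    by_cases hkm : k = mN
    · subst hkm
      rw [if_pos rfl, if_pos (by simp)]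
      push_cast
      omega
    · rw [if_neg hkm, if_neg (by simp; omega)]
      push_cast
      omega

lemma count_pyRange_step (j x n : Int) (hj : 1 ≤ j) :
    (PySem.List.pyRange j (n+1) j).count x
      = if j ≤ x ∧ x < n + 1 ∧ j ∣ x - j then 1 else 0 := by
  have hstep : (0:Int) < j := by omega
  have hnd : (PySem.List.pyRange j (n+1) j).Nodup := by
    rw [PySem.List.pyRange_of_pos _ _ hstep]
    refine (List.nodup_range).map ?_
    intro a b hab
    have h1 : j * (a:Int) = j * (b:Int) := add_left_cancel hab
    exact_mod_cast mul_left_cancel₀ (by omega : j ≠ 0) h1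
  by_cases hx : x ∈ PySem.List.pyRange j (n+1) j
  · rw [if_pos ((PySem.List.mem_pyRange_iff_of_pos hstep x).mp hx)]
    have h1 := List.count_pos_iff.mpr hx
    have h2 := List.nodup_iff_count_le_one.mp hnd x
    omega
  · rw [if_neg (fun hc => hx ((PySem.List.mem_pyRange_iff_of_pos hstep x).mpr hc)),
        List.count_eq_zero_of_not_mem hx]

lemma sum_ind_nat (L : List Int) (c : Int → Prop) [DecidablePred c] :
    (L.map (fun j => if c j then (1:Nat) else 0)).sum = L.countP (fun j => decide (c j)) := by
  induction L with
  | nil => rfl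
  | cons a t ih =>
    simp only [List.map_cons, List.sum_cons, List.countP_cons, ih]
    by_cases hc : c a <;> simp [hc] <;> omega

lemma sieve_eq (n : Int) (hn : 1 ≤ n) :
    ((PySem.List.pyRange 1 (n+1) 1).foldl
        (fun a j => (PySem.List.pyRange j (n+1) j).foldl pvInc a)
        (List.replicate (n+1).toNat 0))
      = (0 : Int) :: (PySem.List.pyRange 1 (n+1) 1).map pvD := by
  rw [← List.foldl_flatMap]
  set L := PySem.List.pyRange 1 (n+1) 1 with hL
  set P := L.flatMap (fun j => PySem.List.pyRange j (n+1) j) with hP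
  set dc0 : List Int := List.replicate (n+1).toNat 0 with hdc0
  have hdc0len : dc0.length = (n+1).toNat := by simp [hdc0]
  have hLlen : L.length = n.toNat := by
    simp [hL, PySem.List.length_pyRange_one]
  have hmemP : ∀ m ∈ P, 1 ≤ m ∧ m < n + 1 := by
    intro m hm
    rw [hP, List.mem_flatMap] at hm
    obtain ⟨j, hjL, hmj⟩ := hm
    have hj := PySem.List.mem_pyRange_one.mp (hL ▸ hjL)
    have hm' := (PySem.List.mem_pyRange_iff_of_pos (by omega) m).mp hmj
    omega
  have hbound : ∀ m ∈ P, 0 ≤ m ∧ m < (dc0.length : Int) := by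
    intro m hm
    have := hmemP m hm
    constructor
    · omega
    · rw [hdc0len]; omega
  -- count of k in P, for 1 ≤ k ≤ n : number of divisors of k
  have hcount : ∀ k : Nat, 1 ≤ k → (k:Int) ≤ n →
      ((P.count (k:Int) : Int)) = pvD (k:Int) := by
    intro k hk1 hkn
    rw [hP, List.count_flatMap]
    have hmap : L.map (List.count ((k:Nat):Int) ∘ fun j => PySem.List.pyRange j (n+1) j)
        = L.map (fun j => if j ≤ (k:Int) ∧ j ∣ (k:Int) then (1:Nat) else 0) := by
      refine List.map_congr_left ?_
      intro j hjL
      have hj := PySem.List.mem_pyRange_one.mp (hL ▸ hjL)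
      show (PySem.List.pyRange j (n+1) j).count (k:Int) = _
      rw [count_pyRange_step j (k:Int) n (by omega)]
      have hdvd : (j ∣ (k:Int) - j) ↔ (j ∣ (k:Int)) := by
        constructor
        · intro h; have := dvd_add h (dvd_refl j); simpa using this
        · intro h; exact dvd_sub h (dvd_refl j)
      by_cases hc : j ≤ (k:Int) ∧ j ∣ (k:Int)
      · rw [if_pos ⟨hc.1, by omega, hdvd.mpr hc.2⟩, if_pos hc]
      · rw [if_neg (fun hh => hc ⟨hh.1, hdvd.mp hh.2.2⟩), if_neg hc]
    rw [hmap, sum_ind_nat]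
    -- countP over [1..n] of (j ≤ k ∧ j ∣ k)  =  countP over [1..k] of (k % j == 0)
    have hsplit : L = PySem.List.pyRange 1 ((k:Int)+1) 1 ++ PySem.List.pyRange ((k:Int)+1) (n+1) 1 := by
      rw [hL]; exact PySem.List.pyRange_one_append 1 ((k:Int)+1) (n+1) (by omega) (by omega)
    rw [hsplit, List.countP_append]
    have h2 : (PySem.List.pyRange ((k:Int)+1) (n+1) 1).countP
        (fun j => decide (j ≤ (k:Int) ∧ j ∣ (k:Int))) = 0 := by
      rw [List.countP_eq_zero]
      intro j hj
      have := PySem.List.mem_pyRange_one.mp hj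
      simp only [decide_eq_true_eq, not_and]
      intro hle
      omega
    rw [h2, Nat.add_zero]
    have h1 : (PySem.List.pyRange 1 ((k:Int)+1) 1).countP
        (fun j => decide (j ≤ (k:Int) ∧ j ∣ (k:Int)))
        = (PySem.List.pyRange 1 ((k:Int)+1) 1).countP
            (fun i => PySem.Int.mod (k:Int) i == 0) := by
      refine List.countP_congr ?_
      intro j hj
      have hjm := PySem.List.mem_pyRange_one.mp hj
      have := PySem.Int.mod_eq_zero_iff_dvd (k:Int) j
      simp only [decide_eq_true_eq, beq_iff_eq]
      constructor
      · intro hc; exact this.mpr hc.2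
      · intro hc; exact ⟨by omega, this.mp hc⟩
    rw [h1, pvD]
    simp [List.countP_eq_length_filter]
  -- now extensionality
  apply List.ext_getElem
  · rw [fold_inc_length, hdc0len]
    simp [hLlen]
    omega
  · intro k hk1 hk2
    have hklen : k < dc0.length := by rw [fold_inc_length] at hk1; exact hk1
    have hgetD : (P.foldl pvInc dc0)[k] = PySem.List.pyGetD (P.foldl pvInc dc0) (k:Int) 0 := by
      rw [PySem.List.pyGetD_natCast, List.getD_eq_getElem _ _ hk1]
    rw [hgetD, fold_inc_get P dc0 hbound k hklen]
    have hdc0get : PySem.List.pyGetD dc0 (k:Int) 0 = 0 := by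
      rw [PySem.List.pyGetD_natCast, hdc0]
      simp [List.getD_eq_getElem?_getD]
    rw [hdc0get, zero_add]
    match k, hk2 with
    | 0, _ =>
      have h0 : (0:Int) ∉ P := fun hm => by have := hmemP _ hm; omega
      simp [List.count_eq_zero_of_not_mem h0]
    | (k+1), hk2 =>
      have hkn : k < L.length := by simpa using hk2
      have hk2' : ((k+1 : Nat) : Int) ≤ n := by
        rw [hdc0len] at hklen; omega
      rw [hcount (k+1) (by omega) hk2']
      have : L[k] = 1 + (k:Int) :=
        PySem.List.getElem_pyRange_one 1 (n+1) k (by simpa [hL] using hkn)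
      simp only [List.getElem_cons_succ, List.getElem_map, this]
      congr 1
      push_cast
      ring

lemma countsList_nil (L : Nat) : countsList L [] = List.replicate L 0 := by
  simp [countsList, List.map_const']

lemma wkSpec_nonneg (ds prev : List Int) : ∀ w ∈ wkSpec prev ds, 0 ≤ w := by
  induction ds generalizing prev with
  | nil => simp [wkSpec]
  | cons v t ih =>
    intro w hw
    simp only [wkSpec, List.mem_cons] at hw
    rcases hw with h | h
    · simp [h]
    · exact ih _ _ h

lemma ind_sum (K : List Nat) (hK : K.Nodup) (x : Int) :
    (K.map (fun (k : Nat) => if ((k : Int) = x) then (1:Int) else 0)).sum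
      = if (∃ k ∈ K, (k : Int) = x) then 1 else 0 := by
  induction K with
  | nil => simp
  | cons a t ih =>
    rcases List.nodup_cons.mp hK with ⟨ha, ht⟩
    rw [List.map_cons, List.sum_cons, ih ht]
    by_cases hax : (a : Int) = x
    · have hnot : ¬ ∃ k ∈ t, (k : Int) = x := by
        rintro ⟨k, hk, hkx⟩
        have hka : k = a := by omega
        exact ha (hka ▸ hk)
      rw [if_pos hax, if_neg hnot, if_pos ⟨a, List.mem_cons_self, hax⟩, add_zero]
    · rw [if_neg hax, zero_add]
      by_cases h : ∃ k ∈ t, (k : Int) = x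
      · rw [if_pos h, if_pos (by rcases h with ⟨k,hk,hkx⟩; exact ⟨k, List.mem_cons_of_mem _ hk, hkx⟩)]
      · rw [if_neg h, if_neg]
        rintro ⟨k, hk, hkx⟩
        rcases List.mem_cons.mp hk with rfl | hk'
        · exact hax hkx
        · exact h ⟨k, hk', hkx⟩

lemma mc_fold (l : List Int) (b c : Int) :
    l.foldl mcStep (b, c)
      = (l.foldl max b,
         (if l.foldl max b = b then c else 0) + (l.count (l.foldl max b) : Int)) := by
  induction l generalizing b c with
  | nil => simp
  | cons w t ih =>
    simp only [List.foldl_cons, mcStep]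
    by_cases h1 : b < w
    · rw [if_pos h1, ih]
      have hbw : max b w = w := by omega
      simp only [hbw]
      have hne : t.foldl max w ≠ b := by have := (PySem.List.le_foldl_max t w).1; omega
      simp only [List.count_cons, beq_iff_eq, Prod.mk.injEq]
      refine ⟨trivial, ?_⟩
      push_cast
      split_ifs <;> omega
    · have hbw : max b w = b := by omega
      rw [if_neg h1]
      by_cases h2 : w = b
      · subst h2
        rw [if_pos (by simp), ih]
        simp only [hbw, List.count_cons, beq_iff_eq, Prod.mk.injEq]
        refine ⟨trivial, ?_⟩
        push_cast
        split_ifs <;> omega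
      · rw [if_neg (by simpa using h2), ih]
        have hne : ¬ (t.foldl max b = w) := by
          have := (PySem.List.le_foldl_max t b).1
          omega
        simp only [hbw, List.count_cons, beq_iff_eq, Prod.mk.injEq]
        refine ⟨trivial, ?_⟩
        push_cast
        split_ifs <;> omega

lemma sum_drop_countsList (L t : Nat) (p : List Int)
    (hp : ∀ x ∈ p, 0 ≤ x ∧ x < (L : Int)) :
    ((countsList L p).drop t).sum = (p.countP (fun x => decide ((t : Int) ≤ x)) : Int) := by
  rw [countsList, ← List.map_drop, List.range_eq_range', List.drop_range']
  simp only [Nat.zero_add, Nat.mul_one]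
  induction p with
  | nil => simp
  | cons x p ih =>
    obtain ⟨hx0, hxL⟩ := hp x List.mem_cons_self
    have hmap : (List.range' t (L - t)).map (fun k : Nat => (((x::p).count (k:Int)) : Int))
        = (List.range' t (L - t)).map (fun k : Nat =>
            ((p.count (k:Int)) : Int) + (if ((k:Int) = x) then 1 else 0)) := by
      refine List.map_congr_left ?_
      intro k _
      rw [List.count_cons]
      push_cast
      by_cases h : (k:Int) = x
      · simp [h]
      · simp [h]
        omega
    rw [hmap, PySem.List.sum_map_add_int, ih (fun y hy => hp y (List.mem_cons_of_mem _ hy)),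
        ind_sum _ (List.nodup_range' ) x, List.countP_cons]
    have hiff : (∃ k ∈ List.range' t (L - t), (k : Int) = x) ↔ (t:Int) ≤ x := by
      constructor
      · rintro ⟨k, hk, rfl⟩
        have := List.mem_range'_1.mp hk
        omega
      · intro hle
        refine ⟨x.toNat, List.mem_range'_1.mpr (by omega), by omega⟩
    by_cases h : (t:Int) ≤ x
    · rw [if_pos (hiff.mpr h), if_pos (by simpa using h)]
      push_cast; ring
    · rw [if_neg (fun hc => h (hiff.mp hc)), if_neg (by simpa using h)]
      push_cast; ring

lemma countsList_inc (L : Nat) (p : List Int) (v : Int) (hv : 0 ≤ v) (hvL : v < (L : Int)) :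
    pvInc (countsList L p) v = countsList L (p ++ [v]) := by
  obtain ⟨vN, rfl⟩ : ∃ vN : Nat, v = (vN : Int) := ⟨v.toNat, by omega⟩
  have hlen : (countsList L p).length = L := by simp [countsList]
  have hvlt : vN < (countsList L p).length := by rw [hlen]; omega
  apply List.ext_getElem
  · rw [pvInc, PySem.List.length_pySetD]
    simp [countsList]
  · intro k hk1 hk2
    have hk : k < L := by
      rw [pvInc, PySem.List.length_pySetD, hlen] at hk1; exact hk1
    have hgl : ∀ (q : List Int) (hkq : k < (countsList L q).length),
        (countsList L q)[k] = ((q.count (k:Int)) : Int) := by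
      intro q hkq
      simp [countsList]
    have hset : (pvInc (countsList L p) (vN:Int))[k]
        = PySem.List.pyGetD (pvInc (countsList L p) (vN:Int)) (k:Int) 0 := by
      rw [PySem.List.pyGetD_natCast, List.getD_eq_getElem _ _ hk1]
    rw [hset, pvInc, PySem.List.pyGetD_pySetD_natCast _ vN k _ 0 hvlt]
    rw [hgl (p ++ [(vN:Int)]) hk2, List.count_append]
    by_cases hkv : k = vN
    · subst hkv
      rw [if_pos rfl, PySem.List.pyGetD_natCast, List.getD_eq_getElem _ _ hvlt,
          hgl p hvlt]
      simp
    · have hklt : k < (countsList L p).length := by rw [hlen]; exact hk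
      rw [if_neg hkv, PySem.List.pyGetD_natCast, List.getD_eq_getElem _ _ hklt, hgl p hklt]
      have : ([((vN:Nat):Int)].count (k:Int)) = 0 := by
        simp [List.count_singleton]
        omega
      rw [this]
      simp

lemma B_main (M : Int) (ds : List Int) (prev : List Int) (b c : Int)
    (hds : ∀ x ∈ ds, 0 ≤ x ∧ x ≤ M) (hprev : ∀ x ∈ prev, 0 ≤ x ∧ x ≤ M) (hM : 0 ≤ M) :
    ds.foldl pvStepB (countsList (M+2).toNat prev, b, c)
    = (countsList (M+2).toNat (prev ++ ds), (wkSpec prev ds).foldl mcStep (b, c)) := by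
  induction ds generalizing prev b c with
  | nil => simp [wkSpec]
  | cons v t ih =>
    obtain ⟨hv0, hvM⟩ := hds v List.mem_cons_self
    have hL : ((((M+2).toNat : Nat)) : Int) = M + 2 := by omega
    have hW : (PySem.List.slice (countsList (M+2).toNat prev) (some (v+1)) none).sum
        = (prev.countP (fun x => decide (v < x)) : Int) := by
      rw [PySem.List.slice_from _ (show (0:Int) ≤ v+1 by omega), sum_drop_countsList _ _ _
          (fun x hx => ⟨(hprev x hx).1, by have := (hprev x hx).2; omega⟩)]
      congr 1
      refine List.countP_congr ?_
      intro x _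
      have : ((((v+1).toNat : Nat)) : Int) = v + 1 := by omega
      simp [this]
    have hF : pvInc (countsList (M+2).toNat prev) v = countsList (M+2).toNat (prev ++ [v]) :=
      countsList_inc _ _ _ hv0 (by omega)
    have hstep : pvStepB (countsList (M+2).toNat prev, b, c) v
        = (countsList (M+2).toNat (prev ++ [v]),
           mcStep (b, c) (prev.countP (fun x => decide (v < x)) : Int)) := by
      simp only [pvStepB, hW, hF, mcStep]
      split_ifs <;> rfl
    rw [List.foldl_cons, hstep, wkSpec, List.foldl_cons,
        ih (prev ++ [v]) _ _
          (fun x hx => hds x (List.mem_cons_of_mem _ hx))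
          (by intro x hx
              rcases List.mem_append.mp hx with h | h
              · exact hprev x h
              · simp at h; subst h; exact ⟨hv0, hvM⟩)]
    simp

lemma solution_eq_alt (n : Int) (hpre : 1 ≤ n) : solution n = solution_alt n := by
  simp only [solution, solution_alt, A_fold, List.nil_append]
  rw [sieve_eq n hpre]
  set ds := (PySem.List.pyRange 1 (n+1) 1).map pvD with hds
  have hds0 : ∀ x ∈ ds, 0 ≤ x := by
    intro x hx
    rw [hds] at hx
    obtain ⟨i, _, rfl⟩ := List.mem_map.mp hx
    simp [pvD, PySem.List.len]
  have hlen : ds.length = n.toNat := by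
    simp [hds, PySem.List.length_pyRange_one]
  have hmax : (((0:Int) :: ds).foldl (fun acc v => max acc v) 0) = ds.foldl max 0 := by
    show ((0:Int) :: ds).foldl max 0 = ds.foldl max 0
    simp
  rw [hmax]
  set M := ds.foldl max 0 with hM
  have hM0 : 0 ≤ M := (PySem.List.le_foldl_max ds 0).1
  have hdsM : ∀ x ∈ ds, 0 ≤ x ∧ x ≤ M := fun x hx =>
    ⟨hds0 x hx, (PySem.List.le_foldl_max ds 0).2 x hx⟩
  rw [PySem.List.slice_from_one]
  show (match PySem.List.max? (wkSpec [] ds) (fun x => x) with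
        | some mwk => [mwk, (PySem.List.count (wkSpec [] ds) mwk : Int)]
        | none => ([] : List Int))
      = [((List.tail ((0:Int) :: ds)).foldl pvStepB (List.replicate (M+2).toNat 0, -1, 0)).2.1,
         ((List.tail ((0:Int) :: ds)).foldl pvStepB (List.replicate (M+2).toNat 0, -1, 0)).2.2]
  rw [List.tail_cons,
      show (List.replicate (M+2).toNat (0:Int)) = countsList (M+2).toNat [] from (countsList_nil _).symm,
      B_main M ds [] (-1) 0 hdsM (by simp) hM0]
  have hne : ds ≠ [] := by
    intro h
    rw [h] at hlen
    simp at hlen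
    omega
  clear_value M ds
  clear hds hmax
  obtain ⟨d0, dr, rfl⟩ := List.exists_cons_of_ne_nil hne
  rw [wkSpec]
  simp only [List.countP_nil, Nat.cast_zero, List.nil_append]
  set wt := wkSpec [d0] dr with hwt
  have hwt0 : ∀ w ∈ wt, 0 ≤ w := fun w hw => wkSpec_nonneg dr [d0] w hw
  have hmax? : PySem.List.max? ((0:Int) :: wt) (fun x => x) = some (wt.foldl max 0) :=
    PySem.List.max?_id_cons 0 wt
  rw [hmax?, mc_fold]
  have hF : ((0:Int) :: wt).foldl max (-1) = wt.foldl max 0 := by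
    simp
  rw [hF]
  have hF0 : (0:Int) ≤ wt.foldl max 0 := (PySem.List.le_foldl_max wt 0).1
  simp only []
  rw [if_neg (by omega : ¬ wt.foldl max 0 = -1), PySem.List.count_eq]
  simp

-- ===== VERDICT (by name: the statement is the Claim_ definition above) =====
theorem solution_spec : Claim_equal_solution := by
  intro n _hd hpre
  exact solution_eq_alt n hpre
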